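-- pv_equiv track=rewrite | github.com/antoineprudhomme5/hackerrank | algorithms/strings/weighted-uniform-string.py | prepare
-- ===== SOURCE A (Python) =====
-- import string
--
-- def prepare(s):
--     dic = {}
--     for i, c in enumerate(list(string.ascii_lowercase)):
--         dic[c] = i+1
--
--     current_weight = 0
--     current_char = None
--     weights = {}
--
--     for i in range(len(s)):
--         if s[i] != current_char:
--             current_char = s[i]
--             current_weight = dic[current_char]
--         else:
--             current_weight += dic[current_char]
--
--         weights[current_weight] = True
--
--     return weights
-- ===== SOURCE B (Python) =====
-- import string
--
--
-- def prepare(s):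
--     dic = {c: i + 1 for i, c in enumerate(string.ascii_lowercase)}
--     weights = {}
--     i, n = 0, len(s)
--     while i < n:
--         j = i
--         while j < n and s[j] == s[i]:
--             j += 1
--         w = dic[s[i]]
--         for k in range(1, j - i + 1):
--             weights[k * w] = True
--         i = j
--     return weights
-- ===== Notes on version B (the rewrite author's own statement) =====
-- stated objective: alternative
-- what changed: B splits the string into maximal runs of equal characters with an explicit two-level scan and, for each run of length L and letter weight w, marks the multiples w, 2w, ..., Lw, instead of A's single flat pass that threads a current-char/current-weight accumulator over every character.
import Mathlib
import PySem

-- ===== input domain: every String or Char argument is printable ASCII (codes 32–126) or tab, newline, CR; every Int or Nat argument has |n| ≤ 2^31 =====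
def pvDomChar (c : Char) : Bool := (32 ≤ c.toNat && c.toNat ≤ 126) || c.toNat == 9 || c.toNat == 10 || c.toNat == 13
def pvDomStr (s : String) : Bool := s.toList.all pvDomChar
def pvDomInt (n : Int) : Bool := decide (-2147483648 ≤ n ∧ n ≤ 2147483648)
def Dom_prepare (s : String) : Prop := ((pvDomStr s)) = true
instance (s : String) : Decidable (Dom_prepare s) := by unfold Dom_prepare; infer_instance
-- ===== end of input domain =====

-- B replaces A's flat character-by-character accumulator pass with a split into maximal
-- equal-character runs followed by a multiples-of-the-weight inner loop ('alternative').

-- ===== PORT A =====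
-- A's letter-weight dict, built by the enumerate loop over string.ascii_lowercase.
def prepDic : PySem.Dict Char Int :=
  (PySem.List.enumerate "abcdefghijklmnopqrstuvwxyz".toList).foldl
    (fun d p => d.insert p.2 (p.1 + 1)) PySem.Dict.empty

-- one iteration of A's loop body; 'dic[current_char]' is exact inside Pre_ (getD is
-- only reached with a lowercase key there; outside Pre_ Python raises KeyError).
def prepStep (st : Int × Option Char × PySem.Dict Int Bool) (c : Char) :
    Int × Option Char × PySem.Dict Int Bool :=
  let cw := if some c ≠ st.2.1 then prepDic.getD c 0 else st.1 + prepDic.getD c 0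
  (cw, some c, st.2.2.insert cw true)

def prepare (s : String) : List (Int × Bool) :=
  -- 'for i in range(len(s)): … s[i] …' iterated as the fold over the characters of s
  (s.toList.foldl prepStep (0, none, PySem.Dict.empty)).2.2.items

-- ===== PORT B =====
-- B's dict comprehension
def prepDicB : PySem.Dict Char Int :=
  PySem.Dict.ofList
    ((PySem.List.enumerate "abcdefghijklmnopqrstuvwxyz".toList).map (fun p => (p.2, p.1 + 1)))

-- Source B's run scanner: the inner 'while j < n and s[j] == s[i]' advance, then 'i = j'
def prepRuns : List Char → List (Char × Nat)
  | [] => []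
  | c :: rest =>
      (c, (rest.takeWhile (· == c)).length + 1) :: prepRuns (rest.dropWhile (· == c))
  termination_by l => l.length
  decreasing_by
    simp only [List.length_cons]
    exact Nat.lt_succ_of_le (List.length_dropWhile_le (· == c) rest)

-- Source B's 'for k in range(1, j - i + 1): weights[k * w] = True'
def prepIns (w : Int) (L : Nat) (d : PySem.Dict Int Bool) : PySem.Dict Int Bool :=
  (PySem.List.pyRange 1 ((L : Int) + 1) 1).foldl (fun d k => d.insert (k * w) true) d

def prepare_alt (s : String) : List (Int × Bool) :=
  ((prepRuns s.toList).foldl (fun d r => prepIns (prepDicB.getD r.1 0) r.2 d)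
    PySem.Dict.empty).items

-- ===== PRECONDITION & SPEC =====
-- Pre_ excludes strings containing a non-lowercase-letter character: there A (and B)
-- raise KeyError on the letter-weight dict lookup, returning nothing.
def Pre_prepare (s : String) : Prop :=
  (s.toList.all (fun c => 97 ≤ c.toNat && c.toNat ≤ 122)) = true
instance (s : String) : Decidable (Pre_prepare s) := by unfold Pre_prepare; infer_instance

def pvWitness_prepare : String := "ab"

def Spec_prepare (s : String) (out : List (Int × Bool)) : Prop := out = prepare_alt s
instance (s : String) (out : List (Int × Bool)) : Decidable (Spec_prepare s out) := by unfold Spec_prepare; infer_instance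

-- ===== CLAIM (what is proved, stated in full; the proofs are below) =====
def Claim_equal_prepare : Prop := ∀ (s : String), Dom_prepare s → Pre_prepare s → Spec_prepare s (prepare s)

-- ===== LEMMAS AND PROOFS =====

theorem prepDic_eq : prepDic = prepDicB := by decide

-- A's loop across the tail of a run: j more copies of c arriving with current weight k*w
theorem prep_inner (c : Char) (w : Int) (hw : prepDic.getD c 0 = w) :
    ∀ (j : Nat) (k : Int) (d : PySem.Dict Int Bool) (l : List Char),
      List.foldl prepStep (k * w, some c, d) (List.replicate j c ++ l) =
      List.foldl prepStep ((k + j) * w, some c,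
        (PySem.List.pyRange (k + 1) (k + j + 1) 1).foldl
          (fun d i => d.insert (i * w) true) d) l := by
  intro j
  induction j with
  | zero => intro k d l; simp
  | succ j ih =>
      intro k d l
      rw [List.replicate_succ, List.cons_append, List.foldl_cons]
      have hstep : prepStep (k * w, some c, d) c =
          ((k + 1) * w, some c, d.insert ((k + 1) * w) true) := by
        simp [prepStep, hw]; constructor <;> ring_nf
      rw [hstep, ih (k + 1) (d.insert ((k + 1) * w) true) l]
      have hr : PySem.List.pyRange (k + 1) (k + (j + 1 : Nat) + 1) 1 =
          (k + 1) :: PySem.List.pyRange (k + 2) (k + (j + 1 : Nat) + 1) 1 := by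
        rw [PySem.List.pyRange_one_cons (by push_cast; omega)]
        push_cast; ring_nf
      rw [hr, List.foldl_cons]
      have h1 : (k + 1 + (j : Int)) * w = (k + ((j + 1 : Nat) : Int)) * w := by push_cast; ring
      have h2 : PySem.List.pyRange (k + 1 + 1) (k + 1 + j + 1) 1 =
          PySem.List.pyRange (k + 2) (k + (j + 1 : Nat) + 1) 1 := by push_cast; ring_nf
      rw [h1, h2]

theorem head?_dropWhile_false (p : Char → Bool) (l : List Char) :
    ∀ c, (l.dropWhile p).head? = some c → p c = false := by
  induction l with
  | nil => simp
  | cons x xs ih =>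
      intro c h
      rw [List.dropWhile_cons] at h
      by_cases hp : p x = true
      · simp [hp] at h; exact ih c h
      · simp [hp] at h; simp [← h]; simpa using hp

theorem prep_main : ∀ (l : List Char) (cc : Option Char) (a : Int) (d : PySem.Dict Int Bool),
    (∀ c, l.head? = some c → cc ≠ some c) →
    (List.foldl prepStep (a, cc, d) l).2.2 =
    (prepRuns l).foldl (fun d r => prepIns (prepDicB.getD r.1 0) r.2 d) d := by
  intro l
  induction l using prepRuns.induct with
  | case1 => intro cc a d _; simp [prepRuns]
  | case2 c rest ih =>
      intro cc a d hcc
      set t := rest.takeWhile (· == c) with ht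
      set u := rest.dropWhile (· == c) with hu
      have hrest : rest = t ++ u := (List.takeWhile_append_dropWhile).symm
      have htrep : t = List.replicate t.length c := by
        rw [List.eq_replicate_length]
        intro b hb
        simpa using List.mem_takeWhile_imp hb
      have hne : some c ≠ cc := fun e => hcc c rfl e.symm
      have hstep : prepStep (a, cc, d) c =
          (prepDic.getD c 0, some c, d.insert (prepDic.getD c 0) true) := by
        simp [prepStep, hne]
      have hinner := prep_inner c (prepDic.getD c 0) rfl t.length 1
        (d.insert (1 * prepDic.getD c 0) true) u
      simp only [one_mul] at hinner
      have hu_head : ∀ c', u.head? = some c' → (some c : Option Char) ≠ some c' := by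
        intro c' h e
        have hfalse := head?_dropWhile_false (· == c) rest c' h
        simp only [Option.some.injEq] at e
        simp [← e] at hfalse
      have hrunsu := ih (some c) ((1 + (t.length : Int)) * prepDic.getD c 0)
        ((PySem.List.pyRange (1 + 1) (1 + (t.length : Int) + 1) 1).foldl
          (fun d i => d.insert (i * prepDic.getD c 0) true)
          (d.insert (prepDic.getD c 0) true))
        (fun c' h e => hu_head c' h e)
      rw [List.foldl_cons, hstep, hrest, htrep, hinner, hrunsu]
      have hruns : prepRuns (c :: rest) = (c, t.length + 1) :: prepRuns u := by
        rw [prepRuns]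
      rw [show (c :: (List.replicate t.length c ++ u)) = c :: rest by
            rw [← htrep, ← hrest],
          hruns, List.foldl_cons]
      have hdic : prepDicB.getD c 0 = prepDic.getD c 0 := by rw [prepDic_eq]
      have hins : prepIns (prepDicB.getD c 0) (t.length + 1) d =
          (PySem.List.pyRange (1 + 1) (1 + (t.length : Int) + 1) 1).foldl
            (fun d i => d.insert (i * prepDic.getD c 0) true)
            (d.insert (prepDic.getD c 0) true) := by
        rw [hdic]
        unfold prepIns
        rw [PySem.List.pyRange_one_cons (by push_cast; omega), List.foldl_cons]
        have h2 : PySem.List.pyRange (1 + 1) (((t.length + 1 : Nat) : Int) + 1) 1 =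
            PySem.List.pyRange (1 + 1) (1 + (t.length : Int) + 1) 1 := by
          push_cast; ring_nf
        rw [h2, one_mul]
      rw [hins]

-- ===== VERDICT (by name: the statement is the Claim_ definition above) =====
theorem prepare_spec : Claim_equal_prepare := by
  intro s _ _
  unfold Spec_prepare prepare prepare_alt
  rw [prep_main s.toList none 0 PySem.Dict.empty (by simp)]
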